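-- pv_equiv track=rewrite | github.com/lexahall/csc480 | board-stupid/boardstupid.py | make_transpositions
-- ===== SOURCE A (Python) =====
-- def make_transpositions(board, width):
--   if type(board[0]) is list:
--     all_transpositions = []
--     transpositions_3d = []
--
--     for flat_board in board:
--       transpositions = make_individual_transpositions(flat_board, width)
--       all_transpositions.append(transpositions)
--
--     num_transpositions = 8
--     for j in range(num_transpositions):
--       transpostion_3d = []
--       for i in range(width):
--         transpostion_3d.append(all_transpositions[i][j])
--       transpositions_3d.append(tuple(transpostion_3d))
--
--     reverse_transpositions = []
--     for transposition in transpositions_3d: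
--       reverse_transpositions.append(transposition[::-1])
--
--     for reverse in reverse_transpositions:
--       transpositions_3d.append(reverse)
--
--     return tuple(transpositions_3d)
--
--   else:
--     transpositions = make_individual_transpositions(board, width)
--
--   return transpositions
--
-- def make_individual_transpositions(board, width):
--   transpositions = []
--   rows = [board[i:i + width] for i in range(0, width * width, width)]
--   cols = [board[i::width] for i in range(0, width)]
--
--   board_one = []
--
--   for i in range(width):
--     for j in range(width - 1, -1, -1):
--       board_one.append(rows[i][j])
--
--   transpositions.append(tuple(board))
--   transpositions.append(tuple(board_one))
--
--   rotate_board(width, width - 1, -1, -1, rows, transpositions)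
--   rotate_board(width, 0, width, 1, cols, transpositions)
--   rotate_board(width, width - 1, -1, -1, cols, transpositions)
--
--   return tuple(transpositions)
--
-- def rotate_board(width, start, stop, step, lists, transpositions):
--   board_one = []
--   board_two = []
--
--   for i in range(start, stop, step):
--     board_one += lists[i]
--     for j in range(width - 1, -1, -1):
--       board_two.append(lists[i][j])
--
--   transpositions.append(tuple(board_one))
--   transpositions.append(tuple(board_two))
-- ===== SOURCE B (Python) =====
-- def make_transpositions(board, width):
--   # The 8 symmetry variants are computed directly by closed-form coordinate
--   # index maps instead of rows/cols slicing plus the rotate_board helper.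
--   if type(board[0]) is list:
--     # list-of-boards: 8 variants per layer, then stack the j-th variant of the
--     # first `width` layers into a tuple, and append the reversed stacks.
--     per_layer = [_variants(flat, width) for flat in board]
--     stacked = [tuple(per_layer[i][j] for i in range(width)) for j in range(8)]
--     return tuple(stacked + [s[::-1] for s in stacked])
--   return _variants(board, width)
--
-- def _variants(board, w):
--   def variant(f):
--     return tuple(board[f(r, c)] for r in range(w) for c in range(w))
--   return (tuple(board),
--           variant(lambda r, c: r * w + (w - 1 - c)),
--           variant(lambda r, c: (w - 1 - r) * w + c),
--           variant(lambda r, c: (w - 1 - r) * w + (w - 1 - c)),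
--           variant(lambda r, c: c * w + r),
--           variant(lambda r, c: (w - 1 - c) * w + r),
--           variant(lambda r, c: c * w + (w - 1 - r)),
--           variant(lambda r, c: (w - 1 - c) * w + (w - 1 - r)))
-- ===== Notes on version B (the rewrite author's own statement) =====
-- stated objective: alternative
-- what changed: Each of the 8 symmetry variants is generated directly by one closed-form coordinate map (r,c) -> source index over the w x w grid, replacing the rows/cols slicing and the shared rotate_board accumulator helper; the list-of-boards branch stacks these per-layer variants the same way A does.
-- intended difference: On flat boards with more than width*width cells (width>0) A returns variants that inconsistently keep, drop or interleave the surplus cells (identity and column-based variants keep them, row-based ones drop them); B uniformly reads only the width*width grid, which is the intended value for a square board. — e.g. on make_transpositions([9, 2], 1): A returns [[9, 2], [9], [9], [9], [9, 2], [9], [9, 2], [9]], B returns [[9, 2], [9], [9], [9], [9], [9], [9], [9]]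
import Mathlib
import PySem

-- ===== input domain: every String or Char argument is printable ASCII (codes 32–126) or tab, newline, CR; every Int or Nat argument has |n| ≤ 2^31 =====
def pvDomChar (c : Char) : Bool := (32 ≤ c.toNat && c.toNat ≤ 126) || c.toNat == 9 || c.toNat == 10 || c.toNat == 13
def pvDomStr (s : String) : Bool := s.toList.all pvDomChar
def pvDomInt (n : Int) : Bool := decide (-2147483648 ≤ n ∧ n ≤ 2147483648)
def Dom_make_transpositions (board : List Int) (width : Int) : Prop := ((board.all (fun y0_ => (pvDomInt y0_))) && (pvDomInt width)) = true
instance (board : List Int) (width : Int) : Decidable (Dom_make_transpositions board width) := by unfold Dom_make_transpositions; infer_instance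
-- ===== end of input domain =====

-- B computes the 8 symmetry variants directly from closed-form coordinate index maps,
-- replacing A's rows/cols slicing and the shared rotate_board accumulator helper (objective: alternative).
-- The signature types board as List Int, so only A's flat-board branch is representable here;
-- Python B also implements the list-of-boards branch and matches A there (tested, not proved).

-- ===== PORT A =====
-- rotate_board(width, start, stop, step, lists, transpositions): the two appends to the
-- mutable 'transpositions' list are ported as returning the extended list.
-- pyGetD is used for lists[i], lists[i][j]: exact wherever the Python indexing does not raise
-- (all of Pre_); slice?…getD [] is board[i::width], exact since Pre_ has width ≠ 0.
def pvRotateBoard (width start stop step : Int) (lists : List (List Int))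
    (transpositions : List (List Int)) : List (List Int) :=
  let board_one := (PySem.List.pyRange start stop step).foldl
    (fun acc i => acc ++ PySem.List.pyGetD lists i []) []
  let board_two := (PySem.List.pyRange start stop step).foldl
    (fun acc i => (PySem.List.pyRange (width - 1) (-1) (-1)).foldl
      (fun acc2 j => acc2 ++ [PySem.List.pyGetD (PySem.List.pyGetD lists i []) j 0]) acc) []
  transpositions ++ [board_one, board_two]

def pvMakeIndividual (board : List Int) (width : Int) : List (List Int) :=
  let rows := (PySem.List.pyRange 0 (width * width) width).map
    (fun i => PySem.List.slice board (some i) (some (i + width)))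
  let cols := (PySem.List.pyRange 0 width 1).map
    (fun i => (PySem.List.slice? board (some i) none width).getD [])
  let board_one := (PySem.List.pyRange 0 width 1).foldl
    (fun acc i => (PySem.List.pyRange (width - 1) (-1) (-1)).foldl
      (fun acc2 j => acc2 ++ [PySem.List.pyGetD (PySem.List.pyGetD rows i []) j 0]) acc) []
  let t := [board, board_one]
  let t := pvRotateBoard width (width - 1) (-1) (-1) rows t
  let t := pvRotateBoard width 0 width 1 cols t
  pvRotateBoard width (width - 1) (-1) (-1) cols t

-- board : List Int, so Python's 'type(board[0]) is list' test is always False: only the flat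
-- branch is reachable under this signature (board[0] raising on [] is excluded by Pre_).
def make_transpositions (board : List Int) (width : Int) : List (List Int) :=
  pvMakeIndividual board width

-- ===== PORT B =====
-- one variant = [board[f(r, c)] for r in range(w) for c in range(w)]; pyGetD is board[...],
-- exact wherever the Python indexing does not raise (all of Pre_).
def pvVariant (board : List Int) (w : Int) (f : Int → Int → Int) : List Int :=
  (PySem.List.pyRange 0 w 1).flatMap
    (fun r => (PySem.List.pyRange 0 w 1).map (fun c => PySem.List.pyGetD board (f r c) 0))

def make_transpositions_alt (board : List Int) (width : Int) : List (List Int) :=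
  [board,
   pvVariant board width (fun r c => r * width + (width - 1 - c)),
   pvVariant board width (fun r c => (width - 1 - r) * width + c),
   pvVariant board width (fun r c => (width - 1 - r) * width + (width - 1 - c)),
   pvVariant board width (fun r c => c * width + r),
   pvVariant board width (fun r c => (width - 1 - c) * width + r),
   pvVariant board width (fun r c => c * width + (width - 1 - r)),
   pvVariant board width (fun r c => (width - 1 - c) * width + (width - 1 - r))]

-- ===== PRECONDITION & SPEC =====
-- Pre_ excludes only inputs where A raises (within the List Int signature): board = []
-- (IndexError at board[0]), width = 0 (ValueError: range step 0), and width > 0 with fewer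
-- than width² cells (IndexError at rows[i][j]).
def Pre_make_transpositions (board : List Int) (width : Int) : Prop :=
  board ≠ [] ∧ width ≠ 0 ∧ (width < 0 ∨ width * width ≤ (board.length : Int))
instance (board : List Int) (width : Int) : Decidable (Pre_make_transpositions board width) := by
  unfold Pre_make_transpositions; infer_instance

def pvWitness_make_transpositions : List Int × Int := ([1, 2, 3, 4], 2)

-- On flat boards with more than width² cells (width > 0) A returns variants that inconsistently
-- keep, drop or interleave the surplus cells (the identity and the column-based variants keep
-- them, the row-based ones drop them); B uniformly uses only the width×width grid, the intended
-- reading for a square board.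
def D_make_transpositions (board : List Int) (width : Int) : Prop :=
  0 < width ∧ width * width < (board.length : Int)
instance (board : List Int) (width : Int) : Decidable (D_make_transpositions board width) := by
  unfold D_make_transpositions; infer_instance

def Spec_make_transpositions (board : List Int) (width : Int) (out : List (List Int)) : Prop :=
  ¬ D_make_transpositions board width → out = make_transpositions_alt board width
instance (board : List Int) (width : Int) (out : List (List Int)) :
    Decidable (Spec_make_transpositions board width out) := by
  unfold Spec_make_transpositions; infer_instance

def pvDiffWitness_make_transpositions : List Int × Int := ([9, 2], 1)
def pvDiffWitnessOut_make_transpositions : (List (List Int)) × (List (List Int)) :=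
  ([[9, 2], [9], [9], [9], [9, 2], [9], [9, 2], [9]],
   [[9, 2], [9], [9], [9], [9], [9], [9], [9]])

-- ===== CLAIM (what is proved, stated in full; the proofs are below) =====
def Claim_unchanged_make_transpositions : Prop := ∀ (board : List Int) (width : Int), Dom_make_transpositions board width → Pre_make_transpositions board width → Spec_make_transpositions board width (make_transpositions board width)
def Claim_changed_make_transpositions : Prop := Dom_make_transpositions (pvDiffWitness_make_transpositions.1) (pvDiffWitness_make_transpositions.2) ∧ Pre_make_transpositions (pvDiffWitness_make_transpositions.1) (pvDiffWitness_make_transpositions.2) ∧ D_make_transpositions (pvDiffWitness_make_transpositions.1) (pvDiffWitness_make_transpositions.2) ∧ make_transpositions (pvDiffWitness_make_transpositions.1) (pvDiffWitness_make_transpositions.2) = pvDiffWitnessOut_make_transpositions.1 ∧ make_transpositions_alt (pvDiffWitness_make_transpositions.1) (pvDiffWitness_make_transpositions.2) = pvDiffWitnessOut_make_transpositions.2 ∧ pvDiffWitnessOut_make_transpositions.1 ≠ pvDiffWitnessOut_make_transpositions.2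

-- ===== LEMMAS AND PROOFS =====

-- proof-side normal form: one variant as a flatMap over Nat coordinates
def pvGrid (board : List Int) (n : Nat) (f : Nat → Nat → Int) : List Int :=
  (List.range n).flatMap
    (fun r => (List.range n).map (fun c => PySem.List.pyGetD board (f r c) 0))

theorem pvVariant_eq_grid (board : List Int) (n : Nat) (f : Int → Int → Int) :
    pvVariant board (n : Int) f = pvGrid board n (fun r c => f r c) := by
  unfold pvVariant pvGrid
  rw [PySem.List.pyRange_one]
  simp [List.flatMap_map, List.map_map, Function.comp_def]

-- countdown range(w-1, -1, -1) as a forward map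
theorem pvCountdown_map {α : Type} (n : Nat) (g : Int → α) :
    (PySem.List.pyRange ((n : Int) - 1) (-1) (-1)).map g
      = (List.range n).map (fun (c : Nat) => g ((n : Int) - 1 - (c : Int))) := by
  rw [PySem.List.pyRange_neg_one]
  have h : ((n : Int) - 1 - -1).toNat = n := by omega
  rw [h, List.map_map]
  rfl

theorem pvGetD_map_range_int (board : List Int) (n : Nat) (g : Nat → Int) (i : Int)
    (h0 : 0 ≤ i) (h1 : i < (n : Int)) :
    PySem.List.pyGetD ((List.range n).map g) i 0 = g i.toNat := by
  rw [PySem.List.pyGetD_eq_getElem _ _ h0 (by simpa using h1)]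
  rw [List.getElem_map, List.getElem_range]

theorem pvSeg (board : List Int) (a n : Nat) (h : a + n ≤ board.length) :
    (board.drop a).take n
      = (List.range n).map (fun (c : Nat) => PySem.List.pyGetD board ((a : Int) + (c : Int)) 0) := by
  apply List.ext_getElem
  · simp; omega
  · intro k h1 h2
    have hk : k < n := by simpa using h2
    have hak : a + k < board.length := by omega
    rw [List.getElem_take, List.getElem_drop]
    rw [List.getElem_map, List.getElem_range]
    rw [PySem.List.pyGetD_eq_getElem _ _ (by positivity) (by exact_mod_cast Nat.cast_lt.mpr hak)]
    have h3 : ((a : Int) + (k : Int)).toNat = a + k := by omega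
    simp [h3]

-- rows[i] (under len = n², 0 ≤ i < n) is the i-th row, as a map over List.range
theorem pvRows_get (board : List Int) (n : Nat) (hn : 0 < n)
    (hlen : board.length = n * n) (i : Int) (h0 : 0 ≤ i) (h1 : i < (n : Int)) :
    PySem.List.pyGetD
        ((PySem.List.pyRange 0 ((n : Int) * n) n).map
          (fun j => PySem.List.slice board (some j) (some (j + n)))) i []
      = (List.range n).map (fun (c : Nat) => PySem.List.pyGetD board (i * n + (c : Int)) 0) := by
  have hnz : (0:Int) < n := by exact_mod_cast hn
  rw [PySem.List.pyRange_of_pos _ _ hnz]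
  have hcount : (if (0:Int) < (n:Int) * n then (((n:Int) * n - 0 + n - 1) / n).toNat else 0) = n := by
    rw [if_pos (by positivity)]
    have h2 : ((n:Int) * n - 0 + n - 1) = (n - 1) + n * n := by ring
    rw [h2, Int.add_mul_ediv_right _ _ (by omega), Int.ediv_eq_zero_of_lt (by omega) (by omega)]
    omega
  rw [hcount, List.map_map]
  rw [PySem.List.pyGetD_eq_getElem _ _ h0 (by simpa using h1)]
  rw [List.getElem_map, List.getElem_range]
  have hi : (i.toNat : Int) = i := Int.toNat_of_nonneg h0
  simp only [Function.comp]
  rw [show (0 + (n:Int) * i.toNat) = ((n * i.toNat : Nat) : Int) by push_cast; ring]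
  rw [show ((n * i.toNat : Nat) : Int) + n = ((n * i.toNat + n : Nat) : Int) by push_cast; ring]
  rw [PySem.List.slice_natCast]
  rw [show n * i.toNat + n - n * i.toNat = n from by omega]
  have hin : i.toNat < n := by omega
  rw [pvSeg board _ n (by simp [hlen]; nlinarith)]
  apply List.map_congr_left
  intro c hc
  congr 1
  push_cast [hi]
  ring

-- cols[i] = board[i::n] (under len = n², 0 ≤ i < n) is the i-th column, as a map over List.range
theorem pvCols_slice (board : List Int) (n : Nat) (hn : 0 < n)
    (hlen : board.length = n * n) (i : Int) (h0 : 0 ≤ i) (h1 : i < (n : Int)) :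
    (PySem.List.slice? board (some i) none (n : Int)).getD []
      = (List.range n).map (fun (c : Nat) => PySem.List.pyGetD board ((c : Int) * n + i) 0) := by
  have hnz : ((n:Int)) ≠ 0 := by positivity
  have hlenI : (board.length : Int) = (n:Int) * n := by exact_mod_cast hlen
  rw [PySem.List.slice?]
  rw [if_neg hnz]
  simp only [PySem.List.sliceIndices]
  rw [if_neg (by omega : ¬ (n:Int) < 0)]
  rw [if_neg (by omega : ¬ (n:Int) < 0)]
  rw [if_neg (by omega : ¬ i < 0)]
  have hpos : (0:Int) < n := by omega
  have hnn : (n:Int) ≤ (n:Int) * n := by nlinarith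
  have hmin : min i (board.length : Int) = i := min_eq_left (by omega)
  have e1 : (if (n:Int) < 0 then (0:Int) else (board.length:Int)) = (board.length:Int) := if_neg (by omega)
  simp only [hmin, e1, if_pos hpos]
  rw [if_pos (by omega : i < (board.length:Int))]
  have hcount : (((board.length:Int) - i + n - 1) / n).toNat = n := by
    have h2 : ((board.length:Int) - i + n - 1) = ((n:Int) - 1 - i) + n * n := by rw [hlenI]; ring
    rw [h2, Int.add_mul_ediv_right _ _ (by omega), Int.ediv_eq_zero_of_lt (by omega) (by omega)]
    omega
  rw [hcount, Option.getD_some]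
  apply List.filterMap_eq_map_iff_forall_eq_some.mpr
  intro c hc
  have hcn : c < n := List.mem_range.mp hc
  have hidx : (i + (n:Int) * c).toNat < board.length := by
    have h5 : i + (n:Int) * c < (n:Int) * n := by
      have hc' : (c:Int) < n := by exact_mod_cast hcn
      nlinarith
    omega
  rw [List.getElem?_eq_getElem hidx]
  congr 1
  have hc' : (c:Int) < n := by exact_mod_cast hcn
  rw [PySem.List.pyGetD_eq_getElem _ _ (by positivity) (by nlinarith)]
  have heq : ((c:Int) * n + i).toNat = (i + (n:Int) * c).toNat := by
    rw [show (c:Int) * n + i = i + (n:Int) * c from by ring]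
  simp [heq]

-- outer loops as flatMaps over List.range
theorem pvFlat_forward (n : Nat) (h : Int → List Int) :
    (PySem.List.pyRange 0 (n:Int) 1).flatMap h
      = (List.range n).flatMap (fun (r : Nat) => h (r : Int)) := by
  rw [PySem.List.pyRange_one, List.flatMap_map]
  simp

theorem pvFlat_countdown (n : Nat) (h : Int → List Int) :
    (PySem.List.pyRange ((n:Int) - 1) (-1) (-1)).flatMap h
      = (List.range n).flatMap (fun (r : Nat) => h ((n : Int) - 1 - (r : Int))) := by
  rw [PySem.List.pyRange_neg_one]
  have e : ((n : Int) - 1 - -1).toNat = n := by omega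
  rw [e, List.flatMap_map]

-- ===== VERDICT (by name: the statement is the Claim_ definition above) =====

theorem make_transpositions_spec : Claim_unchanged_make_transpositions := by
  intro board width _hdom hpre
  obtain ⟨hne, hw0, hcase0⟩ := hpre
  unfold Spec_make_transpositions
  intro hnd
  have hcase : width < 0 ∨ (board.length : Int) = width * width := by
    unfold D_make_transpositions at hnd
    by_cases hw : width < 0
    · exact Or.inl hw
    · refine Or.inr ?_
      rcases hcase0 with h | h
      · omega
      · have hwp : (0:Int) < width := by omega
        have hsq : 0 < width * width := mul_pos hwp hwp
        omega
  rcases lt_or_gt_of_ne hw0 with hneg | hpos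
  · -- width < 0: every loop range is empty on both sides
    simp only [make_transpositions, pvMakeIndividual, pvRotateBoard,
      make_transpositions_alt, pvVariant,
      PySem.List.pyRange_one_eq_nil (by omega : width ≤ 0),
      PySem.List.pyRange_neg_one_eq_nil (by omega : width - 1 ≤ -1)]
    simp
  · -- width = n > 0 and board.length = n * n
    obtain ⟨n, rfl⟩ : ∃ n : Nat, width = (n : Int) := ⟨width.toNat, (Int.toNat_of_nonneg hpos.le).symm⟩
    have hn : 0 < n := by exact_mod_cast hpos
    have hlen : board.length = n * n := by
      rcases hcase with h | h
      · omega
      · have : (board.length : Int) = ((n * n : Nat) : Int) := by push_cast; linarith [h]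
        exact_mod_cast this
    simp only [make_transpositions, pvMakeIndividual, pvRotateBoard, make_transpositions_alt,
      PySem.List.foldl_append_singleton_eq_map, PySem.List.foldl_append_eq_flatMap,
      List.nil_append, List.cons_append]
    simp only [List.cons.injEq]
    refine ⟨trivial, ?_, ?_, ?_, ?_, ?_, ?_, ?_, trivial⟩
    · -- board_one: rows, outer forward, inner countdown
      rw [pvVariant_eq_grid]; unfold pvGrid
      rw [pvFlat_forward]
      apply List.flatMap_congr; intro r hr
      have hr' : r < n := List.mem_range.mp hr
      rw [pvRows_get board n hn hlen _ (by positivity) (by exact_mod_cast hr')]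
      rw [pvCountdown_map]
      apply List.map_congr_left; intro c hc
      have hc' : c < n := List.mem_range.mp hc
      rw [pvGetD_map_range_int board n _ _ (by omega) (by omega)]
      have e : ((((n:Int) - 1 - (c:Int)).toNat : Nat) : Int) = (n:Int) - 1 - (c:Int) := by omega
      rw [e]
    · -- rotate rows countdown, board_one: single loop
      rw [pvVariant_eq_grid]; unfold pvGrid
      rw [pvFlat_countdown]
      apply List.flatMap_congr; intro r hr
      have hr' : r < n := List.mem_range.mp hr
      rw [pvRows_get board n hn hlen _ (by omega) (by omega)]
    · -- rotate rows countdown, board_two: double loop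
      rw [pvVariant_eq_grid]; unfold pvGrid
      rw [pvFlat_countdown]
      apply List.flatMap_congr; intro r hr
      have hr' : r < n := List.mem_range.mp hr
      rw [pvRows_get board n hn hlen _ (by omega) (by omega)]
      rw [pvCountdown_map]
      apply List.map_congr_left; intro c hc
      have hc' : c < n := List.mem_range.mp hc
      rw [pvGetD_map_range_int board n _ _ (by omega) (by omega)]
      have e : ((((n:Int) - 1 - (c:Int)).toNat : Nat) : Int) = (n:Int) - 1 - (c:Int) := by omega
      rw [e]
    · -- rotate cols forward, board_one: single loop
      rw [pvVariant_eq_grid]; unfold pvGrid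
      rw [pvFlat_forward]
      apply List.flatMap_congr; intro r hr
      have hr' : r < n := List.mem_range.mp hr
      rw [PySem.List.pyGetD_map_pyRange_of_nonneg _ _ _ _ (by positivity) (by exact_mod_cast hr')]
      rw [pvCols_slice board n hn hlen _ (by positivity) (by exact_mod_cast hr')]
    · -- rotate cols forward, board_two: double loop
      rw [pvVariant_eq_grid]; unfold pvGrid
      rw [pvFlat_forward]
      apply List.flatMap_congr; intro r hr
      have hr' : r < n := List.mem_range.mp hr
      rw [PySem.List.pyGetD_map_pyRange_of_nonneg _ _ _ _ (by positivity) (by exact_mod_cast hr')]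
      rw [pvCols_slice board n hn hlen _ (by positivity) (by exact_mod_cast hr')]
      rw [pvCountdown_map]
      apply List.map_congr_left; intro c hc
      have hc' : c < n := List.mem_range.mp hc
      rw [pvGetD_map_range_int board n _ _ (by omega) (by omega)]
      have e : ((((n:Int) - 1 - (c:Int)).toNat : Nat) : Int) = (n:Int) - 1 - (c:Int) := by omega
      rw [e]
    · -- rotate cols countdown, board_one: single loop
      rw [pvVariant_eq_grid]; unfold pvGrid
      rw [pvFlat_countdown]
      apply List.flatMap_congr; intro r hr
      have hr' : r < n := List.mem_range.mp hr
      rw [PySem.List.pyGetD_map_pyRange_of_nonneg _ _ _ _ (by omega) (by omega)]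
      rw [pvCols_slice board n hn hlen _ (by omega) (by omega)]
    · -- rotate cols countdown, board_two: double loop
      rw [pvVariant_eq_grid]; unfold pvGrid
      rw [pvFlat_countdown]
      apply List.flatMap_congr; intro r hr
      have hr' : r < n := List.mem_range.mp hr
      rw [PySem.List.pyGetD_map_pyRange_of_nonneg _ _ _ _ (by omega) (by omega)]
      rw [pvCols_slice board n hn hlen _ (by omega) (by omega)]
      rw [pvCountdown_map]
      apply List.map_congr_left; intro c hc
      have hc' : c < n := List.mem_range.mp hc
      rw [pvGetD_map_range_int board n _ _ (by omega) (by omega)]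
      have e : ((((n:Int) - 1 - (c:Int)).toNat : Nat) : Int) = (n:Int) - 1 - (c:Int) := by omega
      rw [e]

theorem make_transpositions_changed : Claim_changed_make_transpositions := by
  unfold Claim_changed_make_transpositions; decide
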